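-- pv_equiv track=rewrite | github.com/jkugelman/crossword | wordlists/sudoku.py | are_enough_line_combinations
-- ===== SOURCE A (Python) =====
-- def are_enough_line_combinations(lines, n, used_words=None, start=None):
--     if used_words is None: used_words = set()
--     if start is None: start = 0
--
--     if n == 0:
--         return True
--
--     for i in range(start, len(lines)):
--         combo = lines[i]
--         if used_words & combo:
--             continue
--         used_words |= combo
--         if are_enough_line_combinations(lines, n - 1, used_words, i + 1):
--             return True
--         used_words -= combo
--
--     return False
-- ===== SOURCE B (Python) =====
-- def are_enough_line_combinations(lines, n, used_words=None, start=None):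
--     if used_words is None: used_words = set()
--     if start is None: start = 0
--
--     # Iterative DFS with an explicit stack of (index, used, still-needed) frames;
--     # the take frame is pushed last so it is explored before the skip frame,
--     # matching the original search order. Does not mutate used_words.
--     stack = [(start, frozenset(used_words), n)]
--     while stack:
--         i, used, need = stack.pop()
--         if need == 0:
--             return True
--         if i >= len(lines):
--             continue
--         combo = lines[i]
--         stack.append((i + 1, used, need))                  # skip lines[i]
--         if not (used & combo):
--             stack.append((i + 1, used | combo, need - 1))  # take lines[i]
--     return False
-- ===== Notes on version B (the rewrite author's own statement) =====
-- stated objective: alternative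
-- what changed: Replaces A's recursive backtracking (a flat for-loop over range(start, len(lines)) with in-place set mutation and undo) by an iterative DFS over an explicit stack of (index, used, needed) frames with immutable frozensets, the take frame pushed after the skip frame so it is explored first; B does not mutate the caller's used_words set, only the return value is preserved.
import Mathlib
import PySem

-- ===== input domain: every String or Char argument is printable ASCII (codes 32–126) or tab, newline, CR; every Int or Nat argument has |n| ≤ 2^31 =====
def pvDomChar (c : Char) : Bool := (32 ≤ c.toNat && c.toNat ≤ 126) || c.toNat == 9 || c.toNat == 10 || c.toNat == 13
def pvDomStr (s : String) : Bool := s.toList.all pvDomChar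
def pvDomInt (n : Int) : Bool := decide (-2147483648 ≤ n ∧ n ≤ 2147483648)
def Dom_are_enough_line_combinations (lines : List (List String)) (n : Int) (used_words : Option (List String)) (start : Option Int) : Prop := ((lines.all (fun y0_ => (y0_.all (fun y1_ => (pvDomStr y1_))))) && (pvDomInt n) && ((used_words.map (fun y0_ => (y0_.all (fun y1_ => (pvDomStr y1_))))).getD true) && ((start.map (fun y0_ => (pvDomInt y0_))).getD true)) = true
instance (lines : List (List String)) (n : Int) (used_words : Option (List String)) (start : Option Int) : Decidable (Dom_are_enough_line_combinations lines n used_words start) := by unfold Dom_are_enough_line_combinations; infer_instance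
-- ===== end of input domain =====

-- B replaces A's recursive flat-for-loop backtracking by an iterative DFS over an explicit
-- stack of (index, used, needed) frames (take frame pushed last, so explored first);
-- A mutates used_words in place on a successful return, B never mutates — only the return
-- value is claimed here.


-- ===== PORT A =====
-- A's body: 'if n == 0: return True' then the for-loop over range(i, len(lines)) with
-- backtracking; `aGoA` is the function body, `aLoopA` the loop (i the loop variable).
-- lines[i] is Python indexing (PySem.List.pyGet?); none = IndexError, outside Pre_ (port returns false there).
mutual
def aGoA (lines : List (List String)) (n : Int) (used : List String) (start : Int) : Bool :=
  if n = 0 then true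
  else aLoopA lines n used start
termination_by (((lines.length : Int) - start).toNat, 1)
decreasing_by apply Prod.Lex.right; omega

def aLoopA (lines : List (List String)) (n : Int) (used : List String) (i : Int) : Bool :=
  if _h : i < (lines.length : Int) then
    match PySem.List.pyGet? lines i with
    | none => false  -- IndexError in Python (i < -len); excluded by Pre_
    | some combo =>
      if PySem.Set.inter used combo ≠ [] then
        aLoopA lines n used (i + 1)          -- continue
      else if aGoA lines (n - 1) (PySem.Set.union used combo) (i + 1) then
        true
      else
        aLoopA lines n used (i + 1)
  else false
termination_by (((lines.length : Int) - i).toNat, 0)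
decreasing_by all_goals (apply Prod.Lex.left; omega)
end

def are_enough_line_combinations (lines : List (List String)) (n : Int) (used_words : Option (List String)) (start : Option Int) : Bool :=
  aGoA lines n (used_words.getD []) (start.getD 0)

-- ===== PORT B =====
-- B: iterative DFS; the stack is a list of (index, used, needed) frames, head = top of stack.
-- Pushing skip then take in Python means the recursive call sees take :: skip :: rest here.
-- Weight of a frame for termination: the search tree below (i, _, _) has < 3^(len-i) nodes.
def bFrameW (L : Nat) (f : Int × List String × Int) : Nat := 3 ^ ((L : Int) - f.1).toNat

def bStackW (L : Nat) (stack : List (Int × List String × Int)) : Nat :=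
  (stack.map (bFrameW L)).sum

def bLoop (lines : List (List String)) (stack : List (Int × List String × Int)) : Bool :=
  match stack with
  | [] => false
  | (i, used, need) :: rest =>
    if need = 0 then true
    else if _h : (lines.length : Int) ≤ i then
      bLoop lines rest                       -- continue
    else
      match PySem.List.pyGet? lines i with
      | none => false  -- IndexError in Python (i < -len); excluded by Pre_
      | some combo =>
        if PySem.Set.inter used combo = [] then
          bLoop lines ((i + 1, PySem.Set.union used combo, need - 1) ::
                       (i + 1, used, need) :: rest)
        else
          bLoop lines ((i + 1, used, need) :: rest)
termination_by bStackW lines.length stack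
decreasing_by
  · simp only [bStackW, List.map, List.sum_cons, bFrameW]
    have : 0 < 3 ^ (((lines.length : Int) - i).toNat) := pow_pos (by omega) _
    omega
  · simp only [bStackW, List.map, List.sum_cons, bFrameW]
    have hk : (((lines.length : Int) - i).toNat) = (((lines.length : Int) - (i + 1)).toNat) + 1 := by omega
    rw [hk, pow_succ]
    have : 0 < 3 ^ (((lines.length : Int) - (i + 1)).toNat) := pow_pos (by omega) _
    omega
  · simp only [bStackW, List.map, List.sum_cons, bFrameW]
    have hk : (((lines.length : Int) - i).toNat) = (((lines.length : Int) - (i + 1)).toNat) + 1 := by omega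
    rw [hk, pow_succ]
    have : 0 < 3 ^ (((lines.length : Int) - (i + 1)).toNat) := pow_pos (by omega) _
    omega

def are_enough_line_combinations_alt (lines : List (List String)) (n : Int) (used_words : Option (List String)) (start : Option Int) : Bool :=
  bLoop lines [(start.getD 0, used_words.getD [], n)]

-- ===== PRECONDITION & SPEC =====
-- Pre_ excludes exactly the inputs on which both Pythons raise IndexError: n ≠ 0 with an
-- effective start below -len(lines), where the first visited index is out of range.
def Pre_are_enough_line_combinations (lines : List (List String)) (n : Int) (used_words : Option (List String)) (start : Option Int) : Prop :=
  n = 0 ∨ -(lines.length : Int) ≤ start.getD 0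
instance (lines : List (List String)) (n : Int) (used_words : Option (List String)) (start : Option Int) : Decidable (Pre_are_enough_line_combinations lines n used_words start) := by unfold Pre_are_enough_line_combinations; infer_instance

def pvWitness_are_enough_line_combinations : List (List String) × Int × Option (List String) × Option Int :=
  ([["cat", "dog"], ["cow"]], 2, none, none)

def Spec_are_enough_line_combinations (lines : List (List String)) (n : Int) (used_words : Option (List String)) (start : Option Int) (out : Bool) : Prop := out = are_enough_line_combinations_alt lines n used_words start
instance (lines : List (List String)) (n : Int) (used_words : Option (List String)) (start : Option Int) (out : Bool) : Decidable (Spec_are_enough_line_combinations lines n used_words start out) := by unfold Spec_are_enough_line_combinations; infer_instance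

-- ===== CLAIM (what is proved, stated in full; the proofs are below) =====
def Claim_equal_are_enough_line_combinations : Prop := ∀ (lines : List (List String)) (n : Int) (used_words : Option (List String)) (start : Option Int), Dom_are_enough_line_combinations lines n used_words start → Pre_are_enough_line_combinations lines n used_words start → Spec_are_enough_line_combinations lines n used_words start (are_enough_line_combinations lines n used_words start)

-- ===== LEMMAS AND PROOFS =====

-- Core bridge: as long as the top frame's index is ≥ -len (no IndexError reachable from it),
-- processing one frame of B's stack computes A's recursion on that frame, then the rest.
theorem pow3_bound1 (x S k : Nat) (h : 3 * x + S ≤ k + 1) (hx : 0 < x) : x + S ≤ k := by omega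

theorem pow3_bound2 (x S k : Nat) (h : 3 * x + S ≤ k + 1) (hx : 0 < x) : x + (x + S) ≤ k := by omega

theorem bStackW_cons (L : Nat) (f : Int × List String × Int) (rest : List (Int × List String × Int)) :
    bStackW L (f :: rest) = bFrameW L f + bStackW L rest := by
  simp [bStackW]

theorem bLoop_cons (lines : List (List String)) :
    ∀ (k : Nat) (i : Int) (used : List String) (need : Int) (rest : List (Int × List String × Int)),
      bStackW lines.length ((i, used, need) :: rest) ≤ k →
      -(lines.length : Int) ≤ i →
      bLoop lines ((i, used, need) :: rest) = (aGoA lines need used i || bLoop lines rest) := by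
  intro k
  induction k with
  | zero =>
    intro i used need rest hk _
    exfalso
    have : 0 < bFrameW lines.length (i, used, need) := pow_pos (by omega) _
    rw [bStackW_cons] at hk
    omega
  | succ k ih =>
    intro i used need rest hk hi
    by_cases hneed : need = 0
    · rw [bLoop, aGoA]; simp [hneed]
    · by_cases hlen : (lines.length : Int) ≤ i
      · rw [bLoop, aGoA]
        simp only [hneed, if_false, dif_pos hlen]
        rw [aLoopA]
        simp [not_lt.mpr hlen]
      · have hlt : i < (lines.length : Int) := by omega
        have hk1 : (((lines.length : Int) - i).toNat) = (((lines.length : Int) - (i + 1)).toNat) + 1 := by omega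
        have hpos : 0 < 3 ^ (((lines.length : Int) - (i + 1)).toNat) := pow_pos (by omega) _
        have hEq : bFrameW lines.length (i, used, need)
            = 3 * 3 ^ (((lines.length : Int) - (i + 1)).toNat) := by
          simp only [bFrameW]
          rw [hk1, pow_succ]
          ring
        rw [bStackW_cons, hEq] at hk
        cases hget : PySem.List.pyGet? lines i with
        | none =>
          exfalso
          have hne : PySem.List.pyGet? lines i ≠ none := by
            rw [Ne, PySem.List.pyGet?_eq_none_iff, not_not]
            unfold PySem.Raise.InRange
            omega
          exact hne hget
        | some combo =>
          have hWskip : bStackW lines.length ((i + 1, used, need) :: rest) ≤ k := by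
            rw [bStackW_cons]
            simp only [bFrameW]
            exact pow3_bound1 _ _ _ hk hpos
          have hskip := ih (i + 1) used need rest hWskip (by omega)
          have hLoopSkip : aLoopA lines need used (i + 1) = aGoA lines need used (i + 1) := by
            rw [aGoA]; simp [hneed]
          rw [bLoop]
          simp only [if_neg hneed, dif_neg hlen, hget]
          by_cases hint : PySem.Set.inter used combo = []
          · have hWtake : bStackW lines.length
                ((i + 1, PySem.Set.union used combo, need - 1) :: (i + 1, used, need) :: rest) ≤ k := by
              rw [bStackW_cons, bStackW_cons]
              simp only [bFrameW]
              exact pow3_bound2 _ _ _ hk hpos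
            rw [if_pos hint,
                ih (i + 1) (PySem.Set.union used combo) (need - 1)
                  ((i + 1, used, need) :: rest) hWtake (by omega), hskip]
            have hA : aGoA lines need used i
                = (aGoA lines (need - 1) (PySem.Set.union used combo) (i + 1)
                   || aGoA lines need used (i + 1)) := by
              rw [aGoA]
              simp only [if_neg hneed]
              rw [aLoopA]
              simp only [dif_pos hlt, hget, if_neg (not_not_intro hint)]
              rw [hLoopSkip]
              cases aGoA lines (need - 1) (PySem.Set.union used combo) (i + 1) <;> simp
            rw [hA, Bool.or_assoc]
          · rw [if_neg hint, hskip]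
            have hA : aGoA lines need used i = aGoA lines need used (i + 1) := by
              rw [aGoA]
              simp only [if_neg hneed]
              rw [aLoopA]
              simp only [dif_pos hlt, hget, if_pos hint]
              exact hLoopSkip
            rw [hA]

-- ===== VERDICT (by name: the statement is the Claim_ definition above) =====
theorem are_enough_line_combinations_spec : Claim_equal_are_enough_line_combinations := by
  intro lines n used_words start _ hpre
  unfold Spec_are_enough_line_combinations are_enough_line_combinations are_enough_line_combinations_alt
  by_cases hn : n = 0
  · rw [aGoA, bLoop]; simp [hn]
  · have hi : -(lines.length : Int) ≤ start.getD 0 := hpre.resolve_left hn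
    rw [bLoop_cons lines (bStackW lines.length [(start.getD 0, used_words.getD [], n)])
        (start.getD 0) (used_words.getD []) n [] le_rfl hi]
    rw [bLoop]
    simp
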